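-- pv_equiv track=rewrite | github.com/mangod12/industryERP | backend_core/app/services/excel_parser.py | find_column_mapping
-- ===== SOURCE A (Python) =====
-- from typing import Any, Dict, Optional, Tuple
--
-- DEFAULT_COLUMN_MAPPINGS: Dict[str, list] = {
--     "item_code": [
--         "item code", "item_code", "code", "mark number", "mark_number",
--         "mark no", "mark no.", "marking", "item no", "item no.",
--         "item number", "mark", "sl no", "sl. no.", "serial",
--         "sr no", "sr. no.", "drawing no", "drawing_no", "drg no",
--         "drg. no.", "drawing number", "drawing_number",
--     ],
--     "item_name": [
--         "item name", "item_name", "name", "description", "item description",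
--         "item_description", "material", "material name", "material_name",
--         "part name", "part_name", "component", "component name",
--         "member", "member name", "member_name", "element",
--         "size", "section size", "profile",
--     ],
--     "section": [
--         "section", "section size", "section_size", "steel section",
--         "profile", "profile name", "shape", "type", "material type",
--         "grade", "steel grade", "specification", "spec",
--     ],
--     "length_mm": [
--         "length", "length_mm", "length (mm)", "length(mm)",
--         "len", "len (mm)", "length mm", "l (mm)", "l(mm)",
--     ],
--     "quantity": [
--         "quantity", "qty", "qty.", "quantity (nos)", "nos",
--         "nos.", "no of pieces", "no. of pieces", "pieces",
--         "pcs", "pcs.", "numbers", "count", "total qty",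
--         "total_qty", "ordered qty", "ordered_qty",
--     ],
--     "weight_per_unit": [
--         "weight per unit", "weight_per_unit", "unit weight",
--         "unit_weight", "wt per unit", "wt/unit", "weight/unit",
--         "weight each", "unit wt", "unit wt.", "wt (kg)",
--         "weight (kg)", "weight_kg", "weight", "wt", "wt.",
--         "weight per piece", "wt per piece", "wt/pc",
--     ],
--     "unit": [
--         "unit", "uom", "unit of measure", "measure",
--     ],
--     "assembly": [
--         "assembly", "assembly_code", "assembly code", "assy",
--         "assy code", "assembly no", "assembly_no",
--     ],
--     "lot": [
--         "lot", "lot_number", "lot number", "lot no", "lot no.",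
--         "batch", "batch no", "batch_number",
--     ],
-- }
--
-- def find_column_mapping(columns: list) -> Dict[str, Optional[str]]:
--     """
--     Auto-detect column mapping from Excel/CSV headers.
--     Returns dict mapping database field names to detected column names.
--     """
--     mapping = {}
--     cols_lower = {c: c.strip().lower() for c in columns}
--
--     for field, aliases in DEFAULT_COLUMN_MAPPINGS.items():
--         matched = None
--         for col, col_lower in cols_lower.items():
--             if col_lower in aliases:
--                 matched = col
--                 break
--         mapping[field] = matched
--
--     return mapping
-- ===== SOURCE B (Python) =====
-- from typing import Dict, Optional
--
-- # The mapping data, flattened to (normalized alias, db field) pairs, kept sorted by alias.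
-- _ALIAS_FIELD_PAIRS = [
--     ('assembly', 'assembly'),
--     ('assembly code', 'assembly'),
--     ('assembly no', 'assembly'),
--     ('assembly_code', 'assembly'),
--     ('assembly_no', 'assembly'),
--     ('assy', 'assembly'),
--     ('assy code', 'assembly'),
--     ('batch', 'lot'),
--     ('batch no', 'lot'),
--     ('batch_number', 'lot'),
--     ('code', 'item_code'),
--     ('component', 'item_name'),
--     ('component name', 'item_name'),
--     ('count', 'quantity'),
--     ('description', 'item_name'),
--     ('drawing no', 'item_code'),
--     ('drawing number', 'item_code'),
--     ('drawing_no', 'item_code'),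
--     ('drawing_number', 'item_code'),
--     ('drg no', 'item_code'),
--     ('drg. no.', 'item_code'),
--     ('element', 'item_name'),
--     ('grade', 'section'),
--     ('item code', 'item_code'),
--     ('item description', 'item_name'),
--     ('item name', 'item_name'),
--     ('item no', 'item_code'),
--     ('item no.', 'item_code'),
--     ('item number', 'item_code'),
--     ('item_code', 'item_code'),
--     ('item_description', 'item_name'),
--     ('item_name', 'item_name'),
--     ('l (mm)', 'length_mm'),
--     ('l(mm)', 'length_mm'),
--     ('len', 'length_mm'),
--     ('len (mm)', 'length_mm'),
--     ('length', 'length_mm'),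
--     ('length (mm)', 'length_mm'),
--     ('length mm', 'length_mm'),
--     ('length(mm)', 'length_mm'),
--     ('length_mm', 'length_mm'),
--     ('lot', 'lot'),
--     ('lot no', 'lot'),
--     ('lot no.', 'lot'),
--     ('lot number', 'lot'),
--     ('lot_number', 'lot'),
--     ('mark', 'item_code'),
--     ('mark no', 'item_code'),
--     ('mark no.', 'item_code'),
--     ('mark number', 'item_code'),
--     ('mark_number', 'item_code'),
--     ('marking', 'item_code'),
--     ('material', 'item_name'),
--     ('material name', 'item_name'),
--     ('material type', 'section'),
--     ('material_name', 'item_name'),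
--     ('measure', 'unit'),
--     ('member', 'item_name'),
--     ('member name', 'item_name'),
--     ('member_name', 'item_name'),
--     ('name', 'item_name'),
--     ('no of pieces', 'quantity'),
--     ('no. of pieces', 'quantity'),
--     ('nos', 'quantity'),
--     ('nos.', 'quantity'),
--     ('numbers', 'quantity'),
--     ('ordered qty', 'quantity'),
--     ('ordered_qty', 'quantity'),
--     ('part name', 'item_name'),
--     ('part_name', 'item_name'),
--     ('pcs', 'quantity'),
--     ('pcs.', 'quantity'),
--     ('pieces', 'quantity'),
--     ('profile', 'item_name'),
--     ('profile', 'section'),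
--     ('profile name', 'section'),
--     ('qty', 'quantity'),
--     ('qty.', 'quantity'),
--     ('quantity', 'quantity'),
--     ('quantity (nos)', 'quantity'),
--     ('section', 'section'),
--     ('section size', 'item_name'),
--     ('section size', 'section'),
--     ('section_size', 'section'),
--     ('serial', 'item_code'),
--     ('shape', 'section'),
--     ('size', 'item_name'),
--     ('sl no', 'item_code'),
--     ('sl. no.', 'item_code'),
--     ('spec', 'section'),
--     ('specification', 'section'),
--     ('sr no', 'item_code'),
--     ('sr. no.', 'item_code'),
--     ('steel grade', 'section'),
--     ('steel section', 'section'),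
--     ('total qty', 'quantity'),
--     ('total_qty', 'quantity'),
--     ('type', 'section'),
--     ('unit', 'unit'),
--     ('unit of measure', 'unit'),
--     ('unit weight', 'weight_per_unit'),
--     ('unit wt', 'weight_per_unit'),
--     ('unit wt.', 'weight_per_unit'),
--     ('unit_weight', 'weight_per_unit'),
--     ('uom', 'unit'),
--     ('weight', 'weight_per_unit'),
--     ('weight (kg)', 'weight_per_unit'),
--     ('weight each', 'weight_per_unit'),
--     ('weight per piece', 'weight_per_unit'),
--     ('weight per unit', 'weight_per_unit'),
--     ('weight/unit', 'weight_per_unit'),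
--     ('weight_kg', 'weight_per_unit'),
--     ('weight_per_unit', 'weight_per_unit'),
--     ('wt', 'weight_per_unit'),
--     ('wt (kg)', 'weight_per_unit'),
--     ('wt per piece', 'weight_per_unit'),
--     ('wt per unit', 'weight_per_unit'),
--     ('wt.', 'weight_per_unit'),
--     ('wt/pc', 'weight_per_unit'),
--     ('wt/unit', 'weight_per_unit'),
-- ]
--
-- # Output key order of the mapping dict.
-- _FIELD_ORDER = ['item_code', 'item_name', 'section', 'length_mm', 'quantity', 'weight_per_unit', 'unit', 'assembly', 'lot']
--
-- # Reverse index built once at import: normalized alias -> fields carrying it.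
-- _REVERSE_INDEX: Dict[str, list] = {}
-- for _a, _f in _ALIAS_FIELD_PAIRS:
--     _REVERSE_INDEX.setdefault(_a, []).append(_f)
--
--
-- def find_column_mapping(columns: list) -> Dict[str, Optional[str]]:
--     """
--     Auto-detect column mapping from Excel/CSV headers.
--     Returns dict mapping database field names to detected column names.
--     """
--     mapping: Dict[str, Optional[str]] = dict.fromkeys(_FIELD_ORDER)
--     seen = set()
--     for col in columns:
--         if col in seen:
--             continue
--         seen.add(col)
--         for field in _REVERSE_INDEX.get(col.strip().lower(), ()):
--             if mapping[field] is None: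
--                 mapping[field] = col
--     return mapping
-- ===== Notes on version B (the rewrite author's own statement) =====
-- stated objective: faster
-- what changed: Instead of scanning the deduplicated columns once per DB field with an inner 'col_lower in aliases' list test, B stores the mapping data as a flat alias-sorted (alias, field) pair table, builds a reverse index dict (alias -> fields) from it once at import, and makes a single column-driven pass over the raw columns with a seen-set, setting mapping[field] = col only while it is still None.
import Mathlib
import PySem

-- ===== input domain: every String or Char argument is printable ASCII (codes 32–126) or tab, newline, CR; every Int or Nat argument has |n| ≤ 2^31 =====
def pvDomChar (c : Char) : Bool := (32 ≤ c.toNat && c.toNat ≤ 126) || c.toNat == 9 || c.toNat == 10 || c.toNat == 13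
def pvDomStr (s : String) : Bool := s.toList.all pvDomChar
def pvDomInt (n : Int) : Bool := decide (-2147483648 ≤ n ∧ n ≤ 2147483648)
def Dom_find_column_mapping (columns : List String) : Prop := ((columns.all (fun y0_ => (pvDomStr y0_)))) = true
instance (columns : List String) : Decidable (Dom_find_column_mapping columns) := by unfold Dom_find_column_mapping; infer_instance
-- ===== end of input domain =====

-- B replaces A's per-field scan over a cols_lower dict by a flat (alias, field) pair table, a reverse
-- index built from it once, and a single column-driven pass with a seen-set (set mapping[field] only
-- while still None); proved to return A's exact dict.

-- ===== PORT A =====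
def pvALIASES : List (String × List String) := [
  ("item_code", ["item code", "item_code", "code", "mark number", "mark_number", "mark no", "mark no.", "marking", "item no", "item no.", "item number", "mark", "sl no", "sl. no.", "serial", "sr no", "sr. no.", "drawing no", "drawing_no", "drg no", "drg. no.", "drawing number", "drawing_number"]),
  ("item_name", ["item name", "item_name", "name", "description", "item description", "item_description", "material", "material name", "material_name", "part name", "part_name", "component", "component name", "member", "member name", "member_name", "element", "size", "section size", "profile"]),
  ("section", ["section", "section size", "section_size", "steel section", "profile", "profile name", "shape", "type", "material type", "grade", "steel grade", "specification", "spec"]),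
  ("length_mm", ["length", "length_mm", "length (mm)", "length(mm)", "len", "len (mm)", "length mm", "l (mm)", "l(mm)"]),
  ("quantity", ["quantity", "qty", "qty.", "quantity (nos)", "nos", "nos.", "no of pieces", "no. of pieces", "pieces", "pcs", "pcs.", "numbers", "count", "total qty", "total_qty", "ordered qty", "ordered_qty"]),
  ("weight_per_unit", ["weight per unit", "weight_per_unit", "unit weight", "unit_weight", "wt per unit", "wt/unit", "weight/unit", "weight each", "unit wt", "unit wt.", "wt (kg)", "weight (kg)", "weight_kg", "weight", "wt", "wt.", "weight per piece", "wt per piece", "wt/pc"]),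
  ("unit", ["unit", "uom", "unit of measure", "measure"]),
  ("assembly", ["assembly", "assembly_code", "assembly code", "assy", "assy code", "assembly no", "assembly_no"]),
  ("lot", ["lot", "lot_number", "lot number", "lot no", "lot no.", "batch", "batch no", "batch_number"])
]

-- cols_lower = {c: c.strip().lower() for c in columns}
def pvColsLower (columns : List String) : PySem.Dict String String :=
  columns.foldl (fun d c => d.insert c (PySem.Str.lower (PySem.Str.strip c))) PySem.Dict.empty

-- inner loop of A: first column (in cols_lower order) whose lowered form is in the alias list
def pvFirstMatch (items : List (String × String)) (aliases : List String) : Option String :=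
  match items with
  | [] => none
  | (col, colLower) :: rest =>
      if aliases.contains colLower then some col else pvFirstMatch rest aliases

def find_column_mapping (columns : List String) : List (String × Option String) :=
  (pvALIASES.foldl
    (fun mapping p => mapping.insert p.1 (pvFirstMatch (pvColsLower columns).items p.2))
    PySem.Dict.empty).items

-- ===== PORT B =====
-- _ALIAS_FIELD_PAIRS: the mapping data flattened to (alias, field) pairs, sorted by alias
def pvPAIRS : List (String × String) := [
  ("assembly", "assembly"), ("assembly code", "assembly"), ("assembly no", "assembly"), ("assembly_code", "assembly"),
  ("assembly_no", "assembly"), ("assy", "assembly"), ("assy code", "assembly"), ("batch", "lot"),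
  ("batch no", "lot"), ("batch_number", "lot"), ("code", "item_code"), ("component", "item_name"),
  ("component name", "item_name"), ("count", "quantity"), ("description", "item_name"), ("drawing no", "item_code"),
  ("drawing number", "item_code"), ("drawing_no", "item_code"), ("drawing_number", "item_code"), ("drg no", "item_code"),
  ("drg. no.", "item_code"), ("element", "item_name"), ("grade", "section"), ("item code", "item_code"),
  ("item description", "item_name"), ("item name", "item_name"), ("item no", "item_code"), ("item no.", "item_code"),
  ("item number", "item_code"), ("item_code", "item_code"), ("item_description", "item_name"), ("item_name", "item_name"),
  ("l (mm)", "length_mm"), ("l(mm)", "length_mm"), ("len", "length_mm"), ("len (mm)", "length_mm"),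
  ("length", "length_mm"), ("length (mm)", "length_mm"), ("length mm", "length_mm"), ("length(mm)", "length_mm"),
  ("length_mm", "length_mm"), ("lot", "lot"), ("lot no", "lot"), ("lot no.", "lot"),
  ("lot number", "lot"), ("lot_number", "lot"), ("mark", "item_code"), ("mark no", "item_code"),
  ("mark no.", "item_code"), ("mark number", "item_code"), ("mark_number", "item_code"), ("marking", "item_code"),
  ("material", "item_name"), ("material name", "item_name"), ("material type", "section"), ("material_name", "item_name"),
  ("measure", "unit"), ("member", "item_name"), ("member name", "item_name"), ("member_name", "item_name"),
  ("name", "item_name"), ("no of pieces", "quantity"), ("no. of pieces", "quantity"), ("nos", "quantity"),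
  ("nos.", "quantity"), ("numbers", "quantity"), ("ordered qty", "quantity"), ("ordered_qty", "quantity"),
  ("part name", "item_name"), ("part_name", "item_name"), ("pcs", "quantity"), ("pcs.", "quantity"),
  ("pieces", "quantity"), ("profile", "item_name"), ("profile", "section"), ("profile name", "section"),
  ("qty", "quantity"), ("qty.", "quantity"), ("quantity", "quantity"), ("quantity (nos)", "quantity"),
  ("section", "section"), ("section size", "item_name"), ("section size", "section"), ("section_size", "section"),
  ("serial", "item_code"), ("shape", "section"), ("size", "item_name"), ("sl no", "item_code"),
  ("sl. no.", "item_code"), ("spec", "section"), ("specification", "section"), ("sr no", "item_code"),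
  ("sr. no.", "item_code"), ("steel grade", "section"), ("steel section", "section"), ("total qty", "quantity"),
  ("total_qty", "quantity"), ("type", "section"), ("unit", "unit"), ("unit of measure", "unit"),
  ("unit weight", "weight_per_unit"), ("unit wt", "weight_per_unit"), ("unit wt.", "weight_per_unit"), ("unit_weight", "weight_per_unit"),
  ("uom", "unit"), ("weight", "weight_per_unit"), ("weight (kg)", "weight_per_unit"), ("weight each", "weight_per_unit"),
  ("weight per piece", "weight_per_unit"), ("weight per unit", "weight_per_unit"), ("weight/unit", "weight_per_unit"), ("weight_kg", "weight_per_unit"),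
  ("weight_per_unit", "weight_per_unit"), ("wt", "weight_per_unit"), ("wt (kg)", "weight_per_unit"), ("wt per piece", "weight_per_unit"),
  ("wt per unit", "weight_per_unit"), ("wt.", "weight_per_unit"), ("wt/pc", "weight_per_unit"), ("wt/unit", "weight_per_unit")
]

-- _FIELD_ORDER
def pvFIELDS : List String := ["item_code", "item_name", "section", "length_mm", "quantity", "weight_per_unit", "unit", "assembly", "lot"]

-- _REVERSE_INDEX: for a, f in _ALIAS_FIELD_PAIRS: rev.setdefault(a, []).append(f)
def pvREV : PySem.Dict String (List String) :=
  pvPAIRS.foldl (fun rev q => rev.modify q.1 [] (· ++ [q.2])) PySem.Dict.empty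

-- the 'for col in columns' loop of B, with its seen-set short-circuit
def pvBLoop : List String → PySem.Set String → PySem.Dict String (Option String) → PySem.Dict String (Option String)
  | [], _, mapping => mapping
  | col :: rest, seen, mapping =>
      if PySem.Set.contains seen col then pvBLoop rest seen mapping
      else
        pvBLoop rest (PySem.Set.add seen col)
          ((pvREV.getD (PySem.Str.lower (PySem.Str.strip col)) []).foldl
            (fun mapping f => if mapping.get? f = some none then mapping.insert f (some col) else mapping)
            mapping)

def find_column_mapping_alt (columns : List String) : List (String × Option String) :=
  (pvBLoop columns PySem.Set.empty
    (pvFIELDS.foldl (fun mapping f => mapping.insert f none) PySem.Dict.empty)).items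

-- ===== PRECONDITION & SPEC =====
def Spec_find_column_mapping (columns : List String) (out : List (String × Option String)) : Prop := out = find_column_mapping_alt columns
instance (columns : List String) (out : List (String × Option String)) : Decidable (Spec_find_column_mapping columns out) := by unfold Spec_find_column_mapping; infer_instance

-- ===== CLAIM (what is proved, stated in full; the proofs are below) =====
def Claim_equal_find_column_mapping : Prop := ∀ (columns : List String), Dom_find_column_mapping columns → Spec_find_column_mapping columns (find_column_mapping columns)

-- ===== LEMMAS AND PROOFS =====

-- both sides reduce to this common closed form: per field, the first column whose lowered form is an alias
def pvTarget (columns : List String) : List (String × Option String) :=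
  pvALIASES.map (fun p =>
    (p.1, columns.find? (fun c => p.2.contains (PySem.Str.lower (PySem.Str.strip c)))))

-- Python's 'or'-style preference of an already-found value
def pvOr (o y : Option String) : Option String :=
  match o with
  | some c => some c
  | none => y

set_option maxRecDepth 8000 in
lemma pvALIASES_keys_nodup : (pvALIASES.map (·.1)).Nodup := by decide

set_option maxRecDepth 8000 in
lemma pvFIELDS_eq : pvFIELDS = pvALIASES.map (·.1) := by decide

-- the flat pair table agrees with A's table (both directions, finite checks)
set_option maxRecDepth 8000 in
lemma pvPAIRS_fwd : ∀ pr ∈ pvPAIRS, ∀ p ∈ pvALIASES, pr.2 = p.1 → pr.1 ∈ p.2 := by decide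

set_option maxRecDepth 8000 in
lemma pvPAIRS_bwd : ∀ p ∈ pvALIASES, ∀ a ∈ p.2, (a, p.1) ∈ pvPAIRS := by decide

lemma find?_ext {α : Type} (l : List α) (p q : α → Bool) (h : ∀ a ∈ l, p a = q a) :
    l.find? p = l.find? q := by
  induction l with
  | nil => rfl
  | cons x rest ih =>
      simp only [List.find?_cons, h x (List.mem_cons_self)]
      cases q x
      · exact ih (fun a ha => h a (List.mem_cons_of_mem _ ha))
      · rfl

lemma pvRev_getD (low : String) :
    pvREV.getD low [] = (pvPAIRS.filter (fun q => q.1 == low)).map (·.2) := by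
  unfold pvREV
  rw [PySem.Dict.getD_foldl_modify_append]
  simp

lemma mem_pvRev_getD (p : String × List String) (hp : p ∈ pvALIASES) (low : String) :
    p.1 ∈ pvREV.getD low [] ↔ low ∈ p.2 := by
  rw [pvRev_getD]
  simp only [List.mem_map, List.mem_filter, beq_iff_eq]
  constructor
  · rintro ⟨q, ⟨hq, rfl⟩, hq2⟩
    exact pvPAIRS_fwd q hq p hp hq2
  · intro hlow
    exact ⟨(low, p.1), ⟨pvPAIRS_bwd p hp low hlow, rfl⟩, rfl⟩

-- mapping state in map form: get?
lemma get?_mkmap (AL : List (String × List String)) (g : String × List String → Option String) (f : String) :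
    (PySem.Dict.mk (AL.map (fun p => (p.1, g p)))).get? f = (AL.find? (fun p => p.1 == f)).map g := by
  induction AL with
  | nil => rfl
  | cons p rest ih =>
      simp only [List.map_cons, PySem.Dict.get?_mk_cons, List.find?_cons]
      by_cases h : p.1 == f
      · simp [h]
      · simp only [h]; simpa using ih

-- insert at an existing key keeps the map form
lemma insert_mkmap (AL : List (String × List String)) (g : String × List String → Option String)
    (f : String) (v : Option String) (hmem : f ∈ AL.map (·.1)) :
    (PySem.Dict.mk (AL.map (fun p => (p.1, g p)))).insert f v =
      PySem.Dict.mk (AL.map (fun p => (p.1, if p.1 = f then v else g p))) := by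
  apply PySem.Dict.ext
  rw [PySem.Dict.items_insert_of_contains]
  · simp only [List.map_map]
    apply List.map_congr_left
    intro p _
    by_cases h : p.1 = f
    · simp [h]
    · simp [h]
  · simp only [PySem.Dict.contains_mk]
    simpa [List.any_eq_true] using hmem

lemma find?_self_of_nodup (AL : List (String × List String)) (hnd : (AL.map (·.1)).Nodup)
    (p : String × List String) (hp : p ∈ AL) :
    AL.find? (fun q => q.1 == p.1) = some p := by
  have hs : (AL.find? (fun q => q.1 == p.1)).isSome := by
    rw [List.find?_isSome]; exact ⟨p, hp, by simp⟩
  obtain ⟨q, hq⟩ := Option.isSome_iff_exists.mp hs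
  have hqmem := List.mem_of_find?_eq_some hq
  have hqeq : q.1 = p.1 := by simpa using List.find?_some hq
  rw [hq, List.inj_on_of_nodup_map hnd hqmem hp hqeq]

-- inner fold of B ('set only if still None') on a mapping state in map form
lemma inner_fold_gen (col : String) (fields : List String) (g : String × List String → Option String) :
    fields.foldl
      (fun (m : PySem.Dict String (Option String)) f =>
        if m.get? f = some none then m.insert f (some col) else m)
      (PySem.Dict.mk (pvALIASES.map (fun p => (p.1, g p)))) =
    PySem.Dict.mk (pvALIASES.map (fun p =>
      (p.1, if p.1 ∈ fields ∧ g p = none then some col else g p))) := by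
  induction fields generalizing g with
  | nil => simp
  | cons f0 rest ih =>
      simp only [List.foldl_cons]
      by_cases hc : (PySem.Dict.mk (pvALIASES.map (fun p => (p.1, g p)))).get? f0 = some none
      · have hc' := hc
        rw [get?_mkmap] at hc'
        obtain ⟨p0, hp0find, hgp0⟩ : ∃ p0, pvALIASES.find? (fun p => p.1 == f0) = some p0 ∧ g p0 = none := by
          cases hfind : pvALIASES.find? (fun p => p.1 == f0) with
          | none => rw [hfind] at hc'; simp at hc'
          | some p0 => rw [hfind] at hc'; exact ⟨p0, rfl, by simpa using hc'⟩
        have hp0mem := List.mem_of_find?_eq_some hp0find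
        have hp0f : p0.1 = f0 := by simpa using List.find?_some hp0find
        rw [if_pos hc, insert_mkmap pvALIASES g f0 (some col)
              (List.mem_map.mpr ⟨p0, hp0mem, hp0f⟩), ih]
        refine congrArg PySem.Dict.mk ?_
        apply List.map_congr_left
        intro p hp
        by_cases hf : p.1 = f0
        · have hpp0 : p = p0 := List.inj_on_of_nodup_map pvALIASES_keys_nodup hp hp0mem (hf.trans hp0f.symm)
          subst hpp0
          simp [hf, hgp0]
        · simp [hf]
      · rw [if_neg hc, ih]
        refine congrArg PySem.Dict.mk ?_
        apply List.map_congr_left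
        intro p hp
        by_cases hf : p.1 = f0
        · have hfind : pvALIASES.find? (fun q => q.1 == f0) = some p := by
            rw [← hf]; exact find?_self_of_nodup pvALIASES pvALIASES_keys_nodup p hp
          have hgp : g p ≠ none := by
            intro hn
            apply hc
            rw [get?_mkmap, hfind]
            simp [hn]
          simp [hgp, hf]
        · simp [hf]

-- closed form of B's column loop, for an arbitrary seen-set (proof helper, not a port)
def pvFindCol : List String → PySem.Set String → List String → Option String
  | [], _, _ => none
  | c :: rest, seen, aliases =>
      if PySem.Set.contains seen c then pvFindCol rest seen aliases
      else if aliases.contains (PySem.Str.lower (PySem.Str.strip c)) then some c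
      else pvFindCol rest (PySem.Set.add seen c) aliases

lemma findCol_skip (c : String) (rest : List String) (seen : PySem.Set String) (aliases : List String)
    (hs : c ∈ seen) : pvFindCol (c :: rest) seen aliases = pvFindCol rest seen aliases := by
  simp only [pvFindCol]
  rw [if_pos ((PySem.Set.contains_iff seen c).mpr hs)]

lemma findCol_hit (c : String) (rest : List String) (seen : PySem.Set String) (aliases : List String)
    (hs : c ∉ seen) (hm : PySem.Str.lower (PySem.Str.strip c) ∈ aliases) :
    pvFindCol (c :: rest) seen aliases = some c := by
  simp only [pvFindCol]
  rw [if_neg (fun h => hs ((PySem.Set.contains_iff seen c).mp h)),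
      if_pos (List.contains_iff_mem.mpr hm)]

lemma findCol_miss (c : String) (rest : List String) (seen : PySem.Set String) (aliases : List String)
    (hs : c ∉ seen) (hm : PySem.Str.lower (PySem.Str.strip c) ∉ aliases) :
    pvFindCol (c :: rest) seen aliases = pvFindCol rest (PySem.Set.add seen c) aliases := by
  simp only [pvFindCol]
  rw [if_neg (fun h => hs ((PySem.Set.contains_iff seen c).mp h)),
      if_neg (fun h => hm (List.contains_iff_mem.mp h))]

lemma bloop_eq (cols : List String) (seen : PySem.Set String)
    (g : String × List String → Option String) :
    pvBLoop cols seen (PySem.Dict.mk (pvALIASES.map (fun p => (p.1, g p)))) =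
    PySem.Dict.mk (pvALIASES.map (fun p => (p.1, pvOr (g p) (pvFindCol cols seen p.2)))) := by
  induction cols generalizing seen g with
  | nil =>
      simp only [pvBLoop]
      refine congrArg PySem.Dict.mk ?_
      apply List.map_congr_left
      intro p _
      cases hg : g p <;> simp [pvOr, pvFindCol]
  | cons c rest ih =>
      simp only [pvBLoop]
      by_cases hs : c ∈ seen
      · rw [if_pos ((PySem.Set.contains_iff seen c).mpr hs), ih]
        refine congrArg PySem.Dict.mk ?_
        apply List.map_congr_left
        intro p _
        rw [findCol_skip c rest seen p.2 hs]
      · rw [if_neg (fun h => hs ((PySem.Set.contains_iff seen c).mp h)), inner_fold_gen, ih]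
        refine congrArg PySem.Dict.mk ?_
        apply List.map_congr_left
        intro p hp
        have hmem := mem_pvRev_getD p hp (PySem.Str.lower (PySem.Str.strip c))
        cases hg : g p with
        | some x =>
            rw [if_neg (fun h => Option.some_ne_none x h.2)]
            rfl
        | none =>
            by_cases hm : PySem.Str.lower (PySem.Str.strip c) ∈ p.2
            · rw [if_pos ⟨hmem.mpr hm, rfl⟩, findCol_hit c rest seen p.2 hs hm]
              rfl
            · rw [if_neg (fun h => hm (hmem.mp h.1)), findCol_miss c rest seen p.2 hs hm]

lemma findcol_eq (cols : List String) (seen : PySem.Set String) (aliases : List String) :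
    pvFindCol cols seen aliases =
      cols.find? (fun c => !(PySem.Set.contains seen c)
                    && aliases.contains (PySem.Str.lower (PySem.Str.strip c))) := by
  induction cols generalizing seen with
  | nil => rfl
  | cons c rest ih =>
      rw [List.find?_cons]
      by_cases hs : c ∈ seen
      · have hb : (!(PySem.Set.contains seen c)
            && aliases.contains (PySem.Str.lower (PySem.Str.strip c))) = false := by
          rw [(PySem.Set.contains_iff seen c).mpr hs]
          rfl
        rw [findCol_skip c rest seen aliases hs, hb]
        exact ih seen
      · by_cases hm : PySem.Str.lower (PySem.Str.strip c) ∈ aliases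
        · have hb : (!(PySem.Set.contains seen c)
              && aliases.contains (PySem.Str.lower (PySem.Str.strip c))) = true := by
            rw [Bool.eq_false_iff.mpr (fun h => hs ((PySem.Set.contains_iff seen c).mp h)),
                List.contains_iff_mem.mpr hm]
            rfl
          rw [findCol_hit c rest seen aliases hs hm, hb]
        · have hm' : aliases.contains (PySem.Str.lower (PySem.Str.strip c)) = false :=
            Bool.eq_false_iff.mpr (fun h => hm (List.contains_iff_mem.mp h))
          have hb : (!(PySem.Set.contains seen c)
              && aliases.contains (PySem.Str.lower (PySem.Str.strip c))) = false := by
            rw [hm']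
            simp
          rw [findCol_miss c rest seen aliases hs hm, hb, ih]
          apply find?_ext
          intro a _
          by_cases hac : a = c
          · subst hac
            simp [PySem.Set.mem_add, hm]
          · simp [PySem.Set.mem_add, hac]

-- ===== A side =====

lemma firstMatch_append (L : List (String × String)) (c low : String) (aliases : List String) :
    pvFirstMatch (L ++ [(c, low)]) aliases =
      pvOr (pvFirstMatch L aliases) (if aliases.contains low then some c else none) := by
  induction L with
  | nil => by_cases h : low ∈ aliases <;> simp [pvFirstMatch, pvOr, h]
  | cons q rest ih =>
      obtain ⟨a, b⟩ := q
      simp only [List.cons_append, pvFirstMatch]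
      by_cases h : aliases.contains b = true
      · rw [if_pos h, if_pos h]
        rfl
      · rw [if_neg h, if_neg h]
        exact ih

lemma colsLower_fold (cols : List String) (d : PySem.Dict String String)
    (h : ∀ pr ∈ d.items, pr.2 = PySem.Str.lower (PySem.Str.strip pr.1)) (aliases : List String) :
    pvFirstMatch ((cols.foldl (fun d c => d.insert c (PySem.Str.lower (PySem.Str.strip c))) d).items) aliases =
      pvOr (pvFirstMatch d.items aliases)
        (cols.find? (fun c => !(d.contains c)
            && aliases.contains (PySem.Str.lower (PySem.Str.strip c)))) := by
  induction cols generalizing d with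
  | nil =>
      simp only [List.foldl_nil, List.find?_nil]
      cases pvFirstMatch d.items aliases <;> rfl
  | cons c cols ih =>
      simp only [List.foldl_cons]
      have h' : ∀ pr ∈ (d.insert c (PySem.Str.lower (PySem.Str.strip c))).items,
          pr.2 = PySem.Str.lower (PySem.Str.strip pr.1) := by
        intro pr hpr
        rcases (PySem.Dict.mem_items_insert _ _ _ _).mp hpr with heq | ⟨hmem, _⟩
        · subst heq; rfl
        · exact h pr hmem
      rw [ih _ h']
      by_cases hc : d.contains c = true
      · have hitems : (d.insert c (PySem.Str.lower (PySem.Str.strip c))).items = d.items := by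
          rw [PySem.Dict.items_insert_of_contains d _ hc]
          conv_rhs => rw [← List.map_id d.items]
          apply List.map_congr_left
          intro pr hpr
          simp only [id]
          by_cases hk : pr.1 = c
          · obtain ⟨k0, v0⟩ := pr
            have hv := h _ hpr
            simp only at hk hv
            subst hk
            rw [hv]
            simp
          · simp [hk]
        rw [hitems, List.find?_cons]
        have hb : (!(d.contains c)
            && aliases.contains (PySem.Str.lower (PySem.Str.strip c))) = false := by
          rw [hc]
          rfl
        rw [hb]
        refine congrArg (pvOr (pvFirstMatch d.items aliases)) ?_
        apply find?_ext
        intro a _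
        by_cases hac : a = c
        · subst hac
          simp [hc]
        · rw [PySem.Dict.contains_insert]
          rw [show (a == c) = false from beq_eq_false_iff_ne.mpr hac]
          simp
      · have hc' : d.contains c = false := Bool.eq_false_iff.mpr hc
        rw [PySem.Dict.items_insert_of_not_contains d _ hc', firstMatch_append, List.find?_cons]
        by_cases hm : PySem.Str.lower (PySem.Str.strip c) ∈ aliases
        · have hmB : aliases.contains (PySem.Str.lower (PySem.Str.strip c)) = true :=
            List.contains_iff_mem.mpr hm
          have hb : (!(d.contains c)
              && aliases.contains (PySem.Str.lower (PySem.Str.strip c))) = true := by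
            rw [hc', hmB]
            rfl
          rw [hb, if_pos hmB]
          cases pvFirstMatch d.items aliases <;> rfl
        · have hmB : aliases.contains (PySem.Str.lower (PySem.Str.strip c)) = false :=
            Bool.eq_false_iff.mpr (fun hx => hm (List.contains_iff_mem.mp hx))
          have hb : (!(d.contains c)
              && aliases.contains (PySem.Str.lower (PySem.Str.strip c))) = false := by
            rw [hmB]
            simp
          rw [hb, if_neg (by rw [hmB]; exact Bool.false_ne_true)]
          cases hx : pvFirstMatch d.items aliases with
          | some x => rfl
          | none =>
              refine find?_ext cols _ _ ?_
              intro a _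
              by_cases hac : a = c
              · subst hac
                simp [hm]
              · rw [PySem.Dict.contains_insert]
                rw [show (a == c) = false from beq_eq_false_iff_ne.mpr hac]
                simp

lemma portA_eq (columns : List String) : find_column_mapping columns = pvTarget columns := by
  unfold find_column_mapping pvTarget
  rw [PySem.Dict.items_foldl_insert_fresh pvALIASES (·.1)
        (fun p => pvFirstMatch (pvColsLower columns).items p.2) PySem.Dict.empty
        (by intro a _; simp) pvALIASES_keys_nodup]
  rw [show (PySem.Dict.empty : PySem.Dict String (Option String)).items = [] from rfl, List.nil_append]
  apply List.map_congr_left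
  intro p _
  refine congrArg (fun o => (p.1, o)) ?_
  unfold pvColsLower
  rw [colsLower_fold columns PySem.Dict.empty
        (by intro pr hpr; rw [show (PySem.Dict.empty : PySem.Dict String String).items = [] from rfl] at hpr; cases hpr) p.2]
  exact find?_ext columns _ _ (by intro a _; simp)

lemma portB_eq (columns : List String) : find_column_mapping_alt columns = pvTarget columns := by
  unfold find_column_mapping_alt pvTarget
  have h0 : pvFIELDS.foldl (fun (m : PySem.Dict String (Option String)) f => m.insert f none)
      PySem.Dict.empty = PySem.Dict.mk (pvALIASES.map (fun p => (p.1, (none : Option String)))) := by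
    apply PySem.Dict.ext
    rw [PySem.Dict.items_foldl_insert_fresh pvFIELDS (fun a => a) (fun _ => none) PySem.Dict.empty
          (by intro a _; rfl) (by simpa using (pvFIELDS_eq ▸ pvALIASES_keys_nodup : pvFIELDS.Nodup))]
    rw [show (PySem.Dict.empty : PySem.Dict String (Option String)).items = [] from rfl, List.nil_append,
        pvFIELDS_eq, List.map_map]
    rfl
  rw [h0, bloop_eq columns PySem.Set.empty (fun _ => none)]
  apply List.map_congr_left
  intro p _
  refine congrArg (fun o => (p.1, o)) ?_
  rw [show pvOr none (pvFindCol columns PySem.Set.empty p.2) = pvFindCol columns PySem.Set.empty p.2 from rfl,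
      findcol_eq]
  exact find?_ext columns _ _ (by intro a _; simp [PySem.Set.empty, PySem.Set.contains])

-- ===== VERDICT (by name: the statement is the Claim_ definition above) =====
theorem find_column_mapping_spec : Claim_equal_find_column_mapping := by
  intro columns _
  unfold Spec_find_column_mapping
  rw [portA_eq, portB_eq]
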